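-- pv_equiv track=rewrite | github.com/8fdafs2/Codewars-Solu-Python | src/kyu3_Alphabetic_Anagrams.py | listPosition_03
-- ===== SOURCE A (Python) =====
-- from collections import Counter
--
-- def listPosition_03(word):
--     """
--     for-loop, right to left
--     """
--     n, ret, fac_div_prod = len(word), 1, 1
--     cnts = Counter()
--
--     for i in range(n):
--         c = word[(n - 1) - i]
--         cnts[c] += 1
--         _sum_ = sum([cnts[_c_] for _c_ in cnts if _c_ < c])
--         ret += fac_div_prod * _sum_ // cnts[c]
--         fac_div_prod = fac_div_prod * (i + 1) // cnts[c]
--     return ret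
-- ===== SOURCE B (Python) =====
-- from collections import Counter
-- from math import factorial
--
-- def listPosition_03(word):
--     """
--     Left-to-right: Counter of the whole word built up front, the number of
--     permutations of the remaining suffix initialized in closed form and
--     updated by one exact division per step (by the suffix length).
--     """
--     counts = Counter(word)
--     rem = len(word)
--     perms = factorial(rem)
--     for v in counts.values():
--         perms //= factorial(v)
--     rank = 1
--     for c in word:
--         for ch in counts:
--             if ch < c:
--                 rank += perms * counts[ch] // rem
--         perms = perms * counts[c] // rem
--         counts[c] -= 1
--         rem -= 1
--     return rank
-- ===== Notes on version B (the rewrite author's own statement) =====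
-- stated objective: alternative
-- what changed: B walks the word left-to-right with a full Counter built up front, recomputing factorial(remaining) and the product of count-factorials directly at each position, instead of A's right-to-left loop that maintains an incremental permutation-count accumulator with chained exact divisions.
import Mathlib
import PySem

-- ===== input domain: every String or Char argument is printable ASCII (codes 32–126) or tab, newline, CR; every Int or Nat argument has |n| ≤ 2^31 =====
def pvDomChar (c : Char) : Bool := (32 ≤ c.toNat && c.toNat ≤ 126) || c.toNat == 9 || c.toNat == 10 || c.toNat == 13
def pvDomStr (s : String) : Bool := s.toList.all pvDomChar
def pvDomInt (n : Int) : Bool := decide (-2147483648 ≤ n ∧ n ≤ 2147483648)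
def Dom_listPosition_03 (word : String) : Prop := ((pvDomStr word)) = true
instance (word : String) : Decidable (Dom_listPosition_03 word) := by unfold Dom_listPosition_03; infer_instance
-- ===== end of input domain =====

-- B re-implements the anagram-rank computation left-to-right with a Counter built up front and
-- direct factorials, instead of A's right-to-left loop with an incremental accumulator (alternative
-- decomposition, same cost).

-- ===== PORT A =====
def listPosition_03 (word : String) : Int :=
  let w := word.toList
  let n : Int := (w.length : Int)
  -- the index (n - 1) - i is always in range for i in range(n); the ' ' default is never used
  let st := (PySem.List.pyRange 0 n 1).foldl
    (fun (st : Int × Int × PySem.Dict Char Int) i =>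
      let ret := st.1
      let fdp := st.2.1
      let c := PySem.List.pyGetD w ((n - 1) - i) ' '
      let cnts := st.2.2.modify c 0 (· + 1)
      let s := ((cnts.keys.filter (fun k => decide (k < c))).map (fun k => cnts.getD k 0)).sum
      (ret + PySem.Int.floordiv (fdp * s) (cnts.getD c 0),
       PySem.Int.floordiv (fdp * (i + 1)) (cnts.getD c 0),
       cnts))
    (1, 1, PySem.Dict.empty)
  st.1

-- ===== PORT B =====
-- math.factorial, ported as Mathlib's Nat.factorial (the argument is ≥ 0 wherever B calls it)
def pyFactorial (n : Int) : Int := (Nat.factorial n.toNat : Int)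

def listPosition_03_alt (word : String) : Int :=
  let w := word.toList
  let counts0 := PySem.Dict.counter w
  let rem0 : Int := (w.length : Int)
  let perms0 := counts0.values.foldl (fun p v => PySem.Int.floordiv p (pyFactorial v)) (pyFactorial rem0)
  let st := w.foldl
    (fun (st : Int × Int × Int × PySem.Dict Char Int) c =>
      let rank := st.1
      let perms := st.2.1
      let rem := st.2.2.1
      let counts := st.2.2.2
      let rank := counts.keys.foldl
        (fun r ch => if ch < c then r + PySem.Int.floordiv (perms * counts.getD ch 0) rem else r)
        rank
      (rank,
       PySem.Int.floordiv (perms * counts.getD c 0) rem,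
       rem - 1,
       counts.modify c 0 (· - 1)))
    (1, perms0, rem0, counts0)
  st.1

-- ===== PRECONDITION & SPEC =====
def Spec_listPosition_03 (word : String) (out : Int) : Prop := out = listPosition_03_alt word
instance (word : String) (out : Int) : Decidable (Spec_listPosition_03 word out) := by unfold Spec_listPosition_03; infer_instance

-- ===== CLAIM (what is proved, stated in full; the proofs are below) =====
def Claim_equal_listPosition_03 : Prop := ∀ (word : String), Dom_listPosition_03 word → Spec_listPosition_03 word (listPosition_03 word)

-- ===== LEMMAS AND PROOFS =====

-- A's loop body, as a function of the (index, character) pair it processes.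
def pvStepA (st : Int × Int × PySem.Dict Char Int) (q : Int × Char) : Int × Int × PySem.Dict Char Int :=
  let ret := st.1
  let fdp := st.2.1
  let c := q.2
  let cnts := st.2.2.modify c 0 (· + 1)
  let s := ((cnts.keys.filter (fun k => decide (k < c))).map (fun k => cnts.getD k 0)).sum
  (ret + PySem.Int.floordiv (fdp * s) (cnts.getD c 0),
   PySem.Int.floordiv (fdp * (q.1 + 1)) (cnts.getD c 0),
   cnts)

-- B's loop body.
def pvStepB (st : Int × Int × Int × PySem.Dict Char Int) (c : Char) : Int × Int × Int × PySem.Dict Char Int :=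
  let rank := st.1
  let perms := st.2.1
  let rem := st.2.2.1
  let counts := st.2.2.2
  let rank := counts.keys.foldl
    (fun r ch => if ch < c then r + PySem.Int.floordiv (perms * counts.getD ch 0) rem else r)
    rank
  (rank,
   PySem.Int.floordiv (perms * counts.getD c 0) rem,
   rem - 1,
   counts.modify c 0 (· - 1))

-- product of the factorials of the letter multiplicities of l
def pvD (l : List Char) : ℕ := ∏ x ∈ l.toFinset, (l.count x).factorial
-- number of distinct permutations of l
def pvP (l : List Char) : ℕ := Nat.multinomial l.toFinset l.count
-- number of permutations of c :: t that start with a letter smaller than c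
def pvContrib (c : Char) (t : List Char) : ℕ :=
  ∑ x ∈ (c :: t).toFinset.filter (fun x => x < c), pvP ((c :: t).erase x)
-- the rank contributions, summed left-to-right over suffixes (B's order)
def pvF : List Char → ℕ
  | [] => 0
  | c :: t => pvContrib c t + pvF t
-- the rank contributions in A's order: p is the already-processed (reversed) part
def pvRevSum : List Char → List Char → ℕ
  | [], _ => 0
  | c :: t, p => pvContrib c p + pvRevSum t (p ++ [c])

lemma pv_toFinset_perm {l l' : List Char} (h : l.Perm l') : l.toFinset = l'.toFinset := by
  ext x; simp [List.mem_toFinset, h.mem_iff]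

lemma pv_toFinset_ofList (xs : List Char) : (PySem.Set.ofList xs).toFinset = xs.toFinset := by
  ext x; simp [List.mem_toFinset, PySem.Set.mem_ofList]

lemma pv_toFinset_filter (K : List Char) (c : Char) :
    (K.filter (fun k => decide (k < c))).toFinset = K.toFinset.filter (fun x => x < c) := by
  ext x; simp [List.mem_toFinset, Finset.mem_filter]

lemma pv_sum_map_natCast (K : List Char) (f : Char → ℕ) :
    (K.map (fun k => ((f k : ℕ) : Int))).sum = (((K.map f).sum : ℕ) : Int) := by
  induction K with
  | nil => simp
  | cons a t ih => simp [ih]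

lemma pvD_mul_pvP (l : List Char) : pvD l * pvP l = (l.length).factorial := by
  unfold pvD pvP
  rw [Nat.multinomial_spec, ← List.sum_toFinset_count_eq_length l]

lemma pvD_pos (l : List Char) : 0 < pvD l :=
  Finset.prod_pos fun _ _ => Nat.factorial_pos _

lemma pvP_nil : pvP [] = 1 := by simp [pvP]

lemma pvP_perm {l l' : List Char} (h : l.Perm l') : pvP l = pvP l' := by
  unfold pvP
  rw [pv_toFinset_perm h]
  exact Nat.multinomial_congr fun a _ => h.count_eq a

lemma pvD_superset {l : List Char} {s : Finset Char} (h : l.toFinset ⊆ s) :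
    ∏ x ∈ s, (l.count x).factorial = pvD l := by
  unfold pvD
  refine (Finset.prod_subset h fun x _ hx => ?_).symm
  have : l.count x = 0 := by
    rw [List.count_eq_zero]
    exact fun hm => hx (List.mem_toFinset.mpr hm)
  simp [this]

lemma pvD_erase {l : List Char} {c : Char} (h : c ∈ l) :
    pvD (l.erase c) * l.count c = pvD l := by
  have hsub : (l.erase c).toFinset ⊆ l.toFinset := fun x hx =>
    List.mem_toFinset.mpr (List.mem_of_mem_erase (List.mem_toFinset.mp hx))
  have h1 : pvD (l.erase c) = ∏ x ∈ l.toFinset, ((l.erase c).count x).factorial :=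
    (pvD_superset hsub).symm
  have hc : c ∈ l.toFinset := List.mem_toFinset.mpr h
  have hcpos : 0 < l.count c := List.count_pos_iff.mpr h
  rw [h1, pvD, ← Finset.mul_prod_erase _ _ hc, ← Finset.mul_prod_erase _ (fun x => (l.count x).factorial) hc]
  have h2 : ∀ x ∈ l.toFinset.erase c, ((l.erase c).count x).factorial = (l.count x).factorial := by
    intro x hx
    rw [List.count_erase_of_ne (Finset.mem_erase.mp hx).1]
  rw [Finset.prod_congr rfl h2]
  rw [List.count_erase_self]
  calc (l.count c - 1).factorial * (∏ x ∈ l.toFinset.erase c, (l.count x).factorial) * l.count c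
      = (l.count c * (l.count c - 1).factorial) * ∏ x ∈ l.toFinset.erase c, (l.count x).factorial := by ring
    _ = (l.count c).factorial * ∏ x ∈ l.toFinset.erase c, (l.count x).factorial := by
        rw [Nat.mul_factorial_pred (by omega)]

lemma pvP_erase {l : List Char} {c : Char} (h : c ∈ l) :
    pvP (l.erase c) * l.length = pvP l * l.count c := by
  have hD := pvD_erase h
  have h1 := pvD_mul_pvP (l.erase c)
  have h2 := pvD_mul_pvP l
  have hlen : (l.erase c).length = l.length - 1 := List.length_erase_of_mem h
  have hlpos : 0 < l.length := List.length_pos_of_mem h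
  apply Nat.eq_of_mul_eq_mul_left (pvD_pos l)
  calc pvD l * (pvP (l.erase c) * l.length)
      = (pvD (l.erase c) * l.count c) * (pvP (l.erase c) * l.length) := by rw [hD]
    _ = (pvD (l.erase c) * pvP (l.erase c)) * (l.count c * l.length) := by ring
    _ = ((l.length - 1).factorial) * (l.count c * l.length) := by rw [h1, hlen]
    _ = (l.length * (l.length - 1).factorial) * l.count c := by ring
    _ = (l.length).factorial * l.count c := by rw [Nat.mul_factorial_pred (by omega)]
    _ = (pvD l * pvP l) * l.count c := by rw [h2]
    _ = pvD l * (pvP l * l.count c) := by ring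

lemma pvCross {l : List Char} {c x : Char} (hc : c ∈ l) (hx : x ∈ l) :
    pvP (l.erase x) * l.count c = pvP (l.erase c) * l.count x := by
  have hlpos : 0 < l.length := List.length_pos_of_mem hc
  apply Nat.eq_of_mul_eq_mul_right hlpos
  calc pvP (l.erase x) * l.count c * l.length
      = (pvP (l.erase x) * l.length) * l.count c := by ring
    _ = (pvP l * l.count x) * l.count c := by rw [pvP_erase hx]
    _ = (pvP l * l.count c) * l.count x := by ring
    _ = (pvP (l.erase c) * l.length) * l.count x := by rw [pvP_erase hc]
    _ = pvP (l.erase c) * l.count x * l.length := by ring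

lemma pvA_sum (c : Char) (p : List Char) :
    (pvP p * ∑ x ∈ (c :: p).toFinset.filter (fun x => x < c), (c :: p).count x) / (c :: p).count c
      = pvContrib c p := by
  have hc : c ∈ c :: p := List.mem_cons_self
  have hcpos : 0 < (c :: p).count c := List.count_pos_iff.mpr hc
  have key : ∀ x ∈ (c :: p).toFinset.filter (fun x => x < c),
      pvP p * (c :: p).count x = pvP ((c :: p).erase x) * (c :: p).count c := by
    intro x hx
    have hxl : x ∈ c :: p := List.mem_toFinset.mp (Finset.mem_filter.mp hx).1
    have h5 := pvCross hc hxl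
    rw [List.erase_cons_head] at h5
    exact h5.symm
  rw [Finset.mul_sum, Finset.sum_congr rfl key, ← Finset.sum_mul]
  rw [Nat.mul_div_cancel _ hcpos]
  rfl

lemma pvA_fdp (c : Char) (p : List Char) :
    (pvP p * (c :: p).length) / (c :: p).count c = pvP (c :: p) := by
  have hc : c ∈ c :: p := List.mem_cons_self
  have hcpos : 0 < (c :: p).count c := List.count_pos_iff.mpr hc
  have := pvP_erase hc
  rw [List.erase_cons_head] at this
  rw [this, Nat.mul_div_cancel _ hcpos]

lemma pvContrib_perm {t t' : List Char} (c : Char) (h : t.Perm t') :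
    pvContrib c t = pvContrib c t' := by
  have hp : (c :: t).Perm (c :: t') := h.cons c
  unfold pvContrib
  rw [pv_toFinset_perm hp]
  exact Finset.sum_congr rfl fun x _ => pvP_perm (hp.erase x)

lemma pvBridge : ∀ (l p : List Char), pvRevSum l p + pvF p.reverse = pvF (l.reverse ++ p.reverse)
  | [], p => by simp [pvRevSum]
  | c :: t, p => by
    have ih := pvBridge t (p ++ [c])
    have h1 : ((p ++ [c]).reverse : List Char) = c :: p.reverse := by simp
    rw [h1] at ih
    have h2 : pvF (c :: p.reverse) = pvContrib c p.reverse + pvF p.reverse := rfl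
    have h3 : pvContrib c p.reverse = pvContrib c p := pvContrib_perm c p.reverse_perm
    have h4 : ((c :: t).reverse ++ p.reverse : List Char) = t.reverse ++ (c :: p.reverse) := by simp
    rw [h4, ← ih, h2, h3]
    have h5 : pvRevSum (c :: t) p = pvContrib c p + pvRevSum t (p ++ [c]) := rfl
    rw [h5]
    omega

lemma pvRevSum_reverse (l : List Char) : pvRevSum l.reverse [] = pvF l := by
  have := pvBridge l.reverse []
  simpa [pvF] using this

-- ==== the A-side loop invariant ====

lemma pv_stepA_eq (p : List Char) (c : Char) (R : Int) :
    pvStepA (R, ((pvP p : ℕ) : Int), PySem.Dict.counter p) (((p.length : ℕ) : Int), c)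
      = (R + ((pvContrib c p : ℕ) : Int), ((pvP (p ++ [c]) : ℕ) : Int), PySem.Dict.counter (p ++ [c])) := by
  have hperm : (p ++ [c]).Perm (c :: p) := List.perm_append_singleton c p
  unfold pvStepA
  simp only [← PySem.Dict.counter_append_singleton]
  have hkeys : (PySem.Dict.counter (p ++ [c])).keys = PySem.Set.ofList (p ++ [c]) :=
    PySem.Dict.keys_counter _
  have hnodup : (PySem.Dict.counter (p ++ [c])).keys.Nodup := PySem.Dict.nodup_keys_counter _
  -- the inner sum
  have hsum : (((PySem.Dict.counter (p ++ [c])).keys.filter (fun k => decide (k < c))).map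
        (fun k => (PySem.Dict.counter (p ++ [c])).getD k 0)).sum
      = ((∑ x ∈ (c :: p).toFinset.filter (fun x => x < c), (c :: p).count x : ℕ) : Int) := by
    have hmapeq : ∀ K : List Char, (K.map (fun k => (PySem.Dict.counter (p ++ [c])).getD k 0))
        = K.map (fun k => (((p ++ [c]).count k : ℕ) : Int)) := by
      intro K
      exact List.map_congr_left fun k _ => by rw [PySem.Dict.getD_counter]
    rw [hkeys, hmapeq, pv_sum_map_natCast,
        ← List.sum_toFinset (fun k => (p ++ [c]).count k)
          ((PySem.Set.nodup_ofList (p ++ [c])).filter _),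
        pv_toFinset_filter, pv_toFinset_ofList, pv_toFinset_perm hperm]
    norm_cast
    exact Finset.sum_congr rfl fun x _ => hperm.count_eq x
  rw [hsum]
  have hget : (PySem.Dict.counter (p ++ [c])).getD c 0 = (((c :: p).count c : ℕ) : Int) := by
    rw [PySem.Dict.getD_counter]
    norm_cast
    exact hperm.count_eq c
  rw [hget]
  have hdiv1 : PySem.Int.floordiv
        (((pvP p : ℕ) : Int) * ((∑ x ∈ (c :: p).toFinset.filter (fun x => x < c), (c :: p).count x : ℕ) : Int))
        (((c :: p).count c : ℕ) : Int)
      = ((pvContrib c p : ℕ) : Int) := by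
    rw [← Nat.cast_mul, PySem.Int.floordiv_natCast, pvA_sum]
  have hdiv2 : PySem.Int.floordiv (((pvP p : ℕ) : Int) * (((p.length : ℕ) : Int) + 1))
        (((c :: p).count c : ℕ) : Int)
      = ((pvP (p ++ [c]) : ℕ) : Int) := by
    have h1 : ((pvP p : ℕ) : Int) * (((p.length : ℕ) : Int) + 1)
        = (((pvP p * (c :: p).length : ℕ) : ℕ) : Int) := by
      push_cast [List.length_cons]
      ring
    rw [h1, PySem.Int.floordiv_natCast, pvA_fdp, pvP_perm hperm]
  rw [hdiv1, hdiv2]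

lemma pvA_loop : ∀ (l p : List Char) (R : Int),
    ((PySem.List.enumerate l ((p.length : ℕ) : Int)).foldl pvStepA
        (R, ((pvP p : ℕ) : Int), PySem.Dict.counter p)).1
      = R + ((pvRevSum l p : ℕ) : Int)
  | [], p, R => by simp [PySem.List.enumerate_nil, pvRevSum]
  | c :: t, p, R => by
    rw [PySem.List.enumerate_cons, List.foldl_cons, pv_stepA_eq]
    have hlen : ((p.length : ℕ) : Int) + 1 = (((p ++ [c]).length : ℕ) : Int) := by
      push_cast [List.length_append, List.length_cons, List.length_nil]
      omega
    rw [hlen, pvA_loop t (p ++ [c]) (R + ((pvContrib c p : ℕ) : Int))]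
    show R + ((pvContrib c p : ℕ) : Int) + ((pvRevSum t (p ++ [c]) : ℕ) : Int)
        = R + ((pvRevSum (c :: t) p : ℕ) : Int)
    have : pvRevSum (c :: t) p = pvContrib c p + pvRevSum t (p ++ [c]) := rfl
    rw [this]
    push_cast
    ring

lemma pvA_eq (word : String) :
    listPosition_03 word = 1 + ((pvF word.toList : ℕ) : Int) := by
  have hconv : listPosition_03 word
      = ((PySem.List.enumerate word.toList.reverse 0).foldl pvStepA (1, 1, PySem.Dict.empty)).1 := by
    show (((PySem.List.pyRange 0 ((word.toList.length : ℕ) : Int) 1).foldl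
        (fun (st : Int × Int × PySem.Dict Char Int) i =>
          pvStepA st (i, PySem.List.pyGetD word.toList ((((word.toList.length : ℕ) : Int) - 1) - i) ' '))
        (1, 1, PySem.Dict.empty)).1 : Int) = _
    rw [PySem.List.enumerate_eq_map_pyRange word.toList.reverse ' ', List.foldl_map]
    have hlen : PySem.List.len word.toList.reverse = ((word.toList.length : ℕ) : Int) := by
      simp [PySem.List.len]
    rw [hlen]
    congr 1
    apply PySem.List.foldl_congr_mem
    intro acc j hj
    rcases PySem.List.mem_pyRange_one.mp hj with ⟨hj0, hj1⟩
    have hjlt : j.toNat < word.toList.length := by omega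
    have hg : PySem.List.pyGetD word.toList ((((word.toList.length : ℕ) : Int) - 1) - j) ' '
        = PySem.List.pyGetD word.toList.reverse j ' ' := by
      rw [PySem.List.pyGetD_eq_getElem word.toList ' ' (by omega) (by omega),
          PySem.List.pyGetD_eq_getElem word.toList.reverse ' ' hj0 (by rw [List.length_reverse]; exact hj1)]
      rw [List.getElem_reverse]
      congr 1
      omega
    rw [hg]
  rw [hconv]
  have h0 : (0 : Int) = (((List.length ([] : List Char) : ℕ)) : Int) := by simp
  have hinit : ((1 : Int), (1 : Int), PySem.Dict.empty (κ := Char) (ν := Int))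
      = (1, ((pvP [] : ℕ) : Int), PySem.Dict.counter []) := by
    rw [pvP_nil]; rfl
  rw [h0, hinit, pvA_loop word.toList.reverse [] 1, pvRevSum_reverse]

-- ==== the B-side loop invariant ====

lemma pvB2_term {l : List Char} {x : Char} (h : x ∈ l) :
    (pvP l * l.count x) / l.length = pvP (l.erase x) := by
  rw [← pvP_erase h]
  exact Nat.mul_div_cancel _ (List.length_pos_of_mem h)

lemma pv_foldl_floordiv (K : List Char) (f : Char → ℕ) :
    ∀ m : ℕ, (K.map (fun k => ((f k : ℕ) : Int))).foldl
        (fun p v => PySem.Int.floordiv p (pyFactorial v)) ((m : ℕ) : Int)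
      = ((m / (K.map (fun k => (f k).factorial)).prod : ℕ) : Int) := by
  induction K with
  | nil => intro m; simp
  | cons a t ih =>
    intro m
    rw [List.map_cons, List.foldl_cons]
    have h1 : PySem.Int.floordiv ((m : ℕ) : Int) (pyFactorial ((f a : ℕ) : Int))
        = (((m / (f a).factorial : ℕ) : ℕ) : Int) := by
      have : pyFactorial ((f a : ℕ) : Int) = (((f a).factorial : ℕ) : Int) := by
        simp [pyFactorial, Int.toNat_natCast]
      rw [this, PySem.Int.floordiv_natCast]
    rw [h1, ih (m / (f a).factorial), List.map_cons, List.prod_cons,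
        Nat.div_div_eq_div_mul]

lemma pvP_eq_div (l : List Char) : (l.length).factorial / pvD l = pvP l := by
  rw [← pvD_mul_pvP l]
  exact Nat.mul_div_cancel_left _ (pvD_pos l)

lemma pvB_init (w : List Char) :
    (PySem.Dict.counter w).values.foldl (fun p v => PySem.Int.floordiv p (pyFactorial v))
        (pyFactorial ((w.length : ℕ) : Int))
      = ((pvP w : ℕ) : Int) := by
  rw [PySem.Dict.values_eq_map_keys _ (PySem.Dict.nodup_keys_counter w) 0]
  have hmap : (PySem.Dict.counter w).keys.map (fun k => (PySem.Dict.counter w).getD k 0)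
      = (PySem.Dict.counter w).keys.map (fun k => ((w.count k : ℕ) : Int)) :=
    List.map_congr_left fun k _ => by rw [PySem.Dict.getD_counter]
  have hfac : pyFactorial ((w.length : ℕ) : Int) = (((w.length).factorial : ℕ) : Int) := by
    simp [pyFactorial, Int.toNat_natCast]
  rw [hmap, hfac, pv_foldl_floordiv]
  have hsub : w.toFinset ⊆ (PySem.Dict.counter w).keys.toFinset := by
    intro x hx
    rw [PySem.Dict.keys_counter, pv_toFinset_ofList]
    exact hx
  have hprod : ((PySem.Dict.counter w).keys.map (fun k => (w.count k).factorial)).prod = pvD w := by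
    rw [← List.prod_toFinset (fun k => (w.count k).factorial) (PySem.Dict.nodup_keys_counter w),
        pvD_superset hsub]
  rw [hprod, pvP_eq_div]

lemma pv_stepB_eq (t : List Char) (c : Char) (d : PySem.Dict Char Int) (R : Int)
    (hnd : d.keys.Nodup)
    (hget : ∀ ch, d.getD ch 0 = (((c :: t).count ch : ℕ) : Int))
    (hmem : ∀ ch ∈ (c :: t), ch ∈ d.keys) :
    pvStepB (R, ((pvP (c :: t) : ℕ) : Int), (((c :: t).length : ℕ) : Int), d) c
      = (R + ((pvContrib c t : ℕ) : Int), ((pvP t : ℕ) : Int), ((t.length : ℕ) : Int),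
         d.modify c 0 (· - 1)) := by
  unfold pvStepB
  have hsub : (c :: t).toFinset ⊆ d.keys.toFinset := fun x hx =>
    List.mem_toFinset.mpr (hmem x (List.mem_toFinset.mp hx))
  have hinner : d.keys.foldl
        (fun r ch => if ch < c then r + PySem.Int.floordiv
            (((pvP (c :: t) : ℕ) : Int) * d.getD ch 0) (((c :: t).length : ℕ) : Int) else r) R
      = R + ((pvContrib c t : ℕ) : Int) := by
    rw [PySem.List.foldl_ite_eq_foldl_filter (fun ch => ch < c)
        (fun r ch => r + PySem.Int.floordiv (((pvP (c :: t) : ℕ) : Int) * d.getD ch 0)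
            (((c :: t).length : ℕ) : Int)) d.keys R,
        PySem.List.foldl_add]
    congr 1
    have hterm : (d.keys.filter (fun ch => decide (ch < c))).map
          (fun ch => PySem.Int.floordiv (((pvP (c :: t) : ℕ) : Int) * d.getD ch 0)
            (((c :: t).length : ℕ) : Int))
        = (d.keys.filter (fun ch => decide (ch < c))).map
          (fun ch => (((pvP (c :: t) * (c :: t).count ch) / (c :: t).length : ℕ) : Int)) := by
      refine List.map_congr_left fun ch _ => ?_
      rw [hget ch, ← Nat.cast_mul, PySem.Int.floordiv_natCast]
    rw [hterm, pv_sum_map_natCast,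
        ← List.sum_toFinset (fun ch => (pvP (c :: t) * (c :: t).count ch) / (c :: t).length)
          (hnd.filter _),
        pv_toFinset_filter]
    norm_cast
    rw [← Finset.sum_subset (Finset.filter_subset_filter _ hsub)
        (fun x _ hx2 => ?_)]
    · unfold pvContrib
      refine Finset.sum_congr rfl fun x hx => ?_
      exact pvB2_term (List.mem_toFinset.mp (Finset.mem_filter.mp hx).1)
    · -- terms outside the support are 0
      have hxnl : x ∉ (c :: t) := by
        intro hmemx
        rcases Finset.mem_filter.mp ‹x ∈ Finset.filter (fun x => x < c) d.keys.toFinset› with ⟨_, hxc⟩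
        exact hx2 (Finset.mem_filter.mpr ⟨List.mem_toFinset.mpr hmemx, hxc⟩)
      have : (c :: t).count x = 0 := by
        rw [List.count_eq_zero]; exact hxnl
      simp [this]
  have hperms : PySem.Int.floordiv (((pvP (c :: t) : ℕ) : Int) * d.getD c 0)
        (((c :: t).length : ℕ) : Int) = ((pvP t : ℕ) : Int) := by
    rw [hget c, ← Nat.cast_mul, PySem.Int.floordiv_natCast,
        pvB2_term List.mem_cons_self, List.erase_cons_head]
  have hrem : (((c :: t).length : ℕ) : Int) - 1 = ((t.length : ℕ) : Int) := by
    push_cast [List.length_cons]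
    ring
  simp only [hinner, hperms, hrem]

lemma pvB_loop : ∀ (l : List Char) (d : PySem.Dict Char Int) (R : Int),
    d.keys.Nodup →
    (∀ ch, d.getD ch 0 = ((l.count ch : ℕ) : Int)) →
    (∀ ch ∈ l, ch ∈ d.keys) →
    (l.foldl pvStepB (R, ((pvP l : ℕ) : Int), ((l.length : ℕ) : Int), d)).1
      = R + ((pvF l : ℕ) : Int)
  | [], d, R, _, _, _ => by simp [pvF]
  | c :: t, d, R, hnd, hget, hmem => by
    rw [List.foldl_cons, pv_stepB_eq t c d R hnd hget hmem]
    have hcontains : d.contains c = true :=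
      (PySem.Dict.contains_iff_mem_keys d c).mpr (hmem c List.mem_cons_self)
    have hkeys' : (d.modify c 0 (· - 1)).keys = d.keys := by
      rw [PySem.Dict.keys_modify]
      exact PySem.Dict.keys_insert_of_contains _ _ hcontains
    have hnd' : (d.modify c 0 (· - 1)).keys.Nodup := by rw [hkeys']; exact hnd
    have hget' : ∀ ch, (d.modify c 0 (· - 1)).getD ch 0 = ((t.count ch : ℕ) : Int) := by
      intro ch
      rw [PySem.Dict.getD_modify]
      by_cases hch : ch = c
      · subst hch
        rw [if_pos rfl, hget ch]
        rw [List.count_cons_self]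
        push_cast
        ring
      · rw [if_neg hch, hget ch]
        have hne : c ≠ ch := fun h => hch h.symm
        norm_cast
        simp [hne]
    have hmem' : ∀ ch ∈ t, ch ∈ (d.modify c 0 (· - 1)).keys := by
      intro ch hch
      rw [hkeys']
      exact hmem ch (List.mem_cons_of_mem c hch)
    rw [pvB_loop t (d.modify c 0 (· - 1)) (R + ((pvContrib c t : ℕ) : Int)) hnd' hget' hmem']
    have : pvF (c :: t) = pvContrib c t + pvF t := rfl
    rw [this]
    push_cast
    ring

lemma pvB_eq (word : String) :
    listPosition_03_alt word = 1 + ((pvF word.toList : ℕ) : Int) := by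
  have hconv : listPosition_03_alt word
      = ((word.toList.foldl pvStepB
          (1,
           (PySem.Dict.counter word.toList).values.foldl
             (fun p v => PySem.Int.floordiv p (pyFactorial v))
             (pyFactorial ((word.toList.length : ℕ) : Int)),
           ((word.toList.length : ℕ) : Int),
           PySem.Dict.counter word.toList))).1 := rfl
  rw [hconv, pvB_init]
  have h1 : ∀ ch, (PySem.Dict.counter word.toList).getD ch 0 = ((word.toList.count ch : ℕ) : Int) :=
    fun ch => PySem.Dict.getD_counter word.toList ch
  have h2 : ∀ ch ∈ word.toList, ch ∈ (PySem.Dict.counter word.toList).keys := by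
    intro ch hch
    rw [PySem.Dict.keys_counter]
    exact (PySem.Set.mem_ofList word.toList ch).mpr hch
  exact pvB_loop word.toList (PySem.Dict.counter word.toList) 1
    (PySem.Dict.nodup_keys_counter _) h1 h2

-- ===== VERDICT (by name: the statement is the Claim_ definition above) =====
theorem listPosition_03_spec : Claim_equal_listPosition_03 := by
  unfold Claim_equal_listPosition_03
  intro word _
  unfold Spec_listPosition_03
  rw [pvA_eq, pvB_eq]
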